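-- pv_equiv track=rewrite | github.com/glapon/data_science_projects | codecademy_hurricanes/hurricanes.py | area_counts
-- ===== SOURCE A (Python) =====
-- def area_counts(hurricanes):
--   times_affected = {}
--   for hurricane in hurricanes.values():
--     for area in hurricane['Areas Affected']:
--       if area in times_affected:
--         times_affected[area] += 1
--       else:
--         times_affected[area] = 1
--   return times_affected
-- ===== SOURCE B (Python) =====
-- def area_counts(hurricanes):
--   areas = [area for hurricane in hurricanes.values() for area in hurricane['Areas Affected']]
--   counts = {}
--   run = sorted(areas)
--   while run:
--     key = run[0]
--     n = 1
--     while n < len(run) and run[n] == key: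
--       n += 1
--     counts[key] = n
--     run = run[n:]
--   return {a: counts[a] for a in dict.fromkeys(areas)}
-- ===== Notes on version B (the rewrite author's own statement) =====
-- stated objective: alternative
-- what changed: B replaces A's incremental dict tally with sort-then-group: it flattens all areas, sorts them, scans the sorted list once measuring each run's length to get the counts, and finally rebuilds the dict in first-occurrence order via dict.fromkeys.
-- outside the precondition, e.g. on area_counts({'h1': {'Name': []}}): A raises KeyError, B raises KeyError
import Mathlib
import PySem

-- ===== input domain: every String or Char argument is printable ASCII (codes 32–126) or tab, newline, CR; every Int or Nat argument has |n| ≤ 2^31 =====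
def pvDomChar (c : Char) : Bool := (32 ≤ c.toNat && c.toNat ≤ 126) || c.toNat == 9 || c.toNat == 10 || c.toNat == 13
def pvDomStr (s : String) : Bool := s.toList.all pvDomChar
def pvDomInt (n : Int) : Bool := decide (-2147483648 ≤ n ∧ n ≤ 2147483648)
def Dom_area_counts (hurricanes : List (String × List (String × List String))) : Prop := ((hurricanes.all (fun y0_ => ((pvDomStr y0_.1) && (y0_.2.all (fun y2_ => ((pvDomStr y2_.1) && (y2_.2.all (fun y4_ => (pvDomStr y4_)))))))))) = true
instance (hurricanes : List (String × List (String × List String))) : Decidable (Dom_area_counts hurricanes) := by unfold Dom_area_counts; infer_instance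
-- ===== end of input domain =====

-- B replaces A's incremental dict tally by sort-then-group (run-length scan of the sorted
-- flattened area list, order restored with dict.fromkeys); same result, alternative algorithm.


-- ===== PORT A =====
def area_counts (hurricanes : List (String × List (String × List String))) : List (String × Int) :=
  (hurricanes.foldl
    (fun (times_affected : PySem.Dict String Int) hurricane =>
      ((PySem.Dict.mk hurricane.2).getD "Areas Affected" []).foldl
        (fun (times_affected : PySem.Dict String Int) area =>
          if times_affected.contains area then
            times_affected.insert area (times_affected.getD area 0 + 1)
          else
            times_affected.insert area 1)
        times_affected)
    PySem.Dict.empty).items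

-- ===== PORT B =====
-- the 'while run: … run = run[n:]' loop of Source B: key = run[0], the inner while computes
-- n = 1 + length of the prefix of the tail equal to key, counts[key] = n, run = run[n:]
def pvGroupRuns (counts : PySem.Dict String Int) : List String → PySem.Dict String Int
  | [] => counts
  | key :: rest =>
      let n : Nat := 1 + (rest.takeWhile (fun y => y == key)).length
      pvGroupRuns (counts.insert key (n : Int)) ((key :: rest).drop n)
termination_by l => l.length
decreasing_by simp [List.length_drop]

def area_counts_alt (hurricanes : List (String × List (String × List String))) : List (String × Int) :=
  let areas := hurricanes.flatMap (fun hurricane => (PySem.Dict.mk hurricane.2).getD "Areas Affected" [])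
  let counts := pvGroupRuns PySem.Dict.empty (PySem.List.sorted areas (fun x => x))
  -- final dict comprehension over dict.fromkeys(areas); counts[a] is always present
  -- (every a ∈ areas occurs in sorted(areas)), so it is ported as getD with default 0
  ((PySem.List.dedup areas).foldl
    (fun (d : PySem.Dict String Int) a => d.insert a (counts.getD a 0))
    PySem.Dict.empty).items

-- ===== PRECONDITION & SPEC =====
-- Pre_ excludes inputs on which Python's A raises KeyError (a hurricane dict without the
-- key "Areas Affected"), and inputs with duplicate dict keys at either level, on which the
-- association-list view diverges from Python's dict (later duplicates overwrite earlier ones).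
def Pre_area_counts (hurricanes : List (String × List (String × List String))) : Prop :=
  (hurricanes.map Prod.fst).Nodup ∧
  ∀ h ∈ hurricanes, (h.2.map Prod.fst).Nodup ∧ "Areas Affected" ∈ h.2.map Prod.fst
instance (hurricanes : List (String × List (String × List String))) : Decidable (Pre_area_counts hurricanes) := by unfold Pre_area_counts; infer_instance

def pvWitness_area_counts : (List (String × List (String × List String))) :=
  [("h1", [("Areas Affected", ["a", "b"]), ("Name", [])]), ("h2", [("Areas Affected", ["a"])])]

def Spec_area_counts (hurricanes : List (String × List (String × List String))) (out : List (String × Int)) : Prop := out = area_counts_alt hurricanes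
instance (hurricanes : List (String × List (String × List String))) (out : List (String × Int)) : Decidable (Spec_area_counts hurricanes out) := by unfold Spec_area_counts; infer_instance

-- ===== CLAIM (what is proved, stated in full; the proofs are below) =====
def Claim_equal_area_counts : Prop := ∀ (hurricanes : List (String × List (String × List String))), Dom_area_counts hurricanes → Pre_area_counts hurricanes → Spec_area_counts hurricanes (area_counts hurricanes)

-- ===== LEMMAS AND PROOFS =====

-- folding over a flattened list is the nested fold
theorem foldl_flatMap_eq {α β σ : Type} (l : List α) (f : α → List β) (g : σ → β → σ) (init : σ) :
    (l.flatMap f).foldl g init = l.foldl (fun acc x => (f x).foldl g acc) init := by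
  induction l generalizing init with
  | nil => rfl
  | cons a t ih => simp [List.flatMap_cons, List.foldl_append, ih]

-- A's if-branches are exactly the counter step
theorem counter_step_eq (d : PySem.Dict String Int) (area : String) :
    (if d.contains area then d.insert area (d.getD area 0 + 1) else d.insert area 1)
      = d.insert area (d.getD area 0 + 1) := by
  by_cases h : d.contains area = true
  · simp [h]
  · simp only [Bool.not_eq_true] at h
    simp [h, PySem.Dict.getD_of_not_contains d 0 h]

theorem area_counts_eq_items_counter (hurricanes : List (String × List (String × List String))) :
    area_counts hurricanes =
      (PySem.Dict.counter
        (hurricanes.flatMap (fun h => (PySem.Dict.mk h.2).getD "Areas Affected" []))).items := by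
  unfold area_counts
  rw [← foldl_flatMap_eq, ← PySem.Dict.foldl_insert_getD_add_one_eq_counter]
  congr 2
  funext d area
  exact counter_step_eq d area

-- in a sorted list headed by x, x does not occur past its initial run
theorem count_dropWhile_sorted_eq_zero (x : String) (rest : List String)
    (hle : ∀ y ∈ rest, x ≤ y) (hp : rest.Pairwise (· ≤ ·)) :
    (rest.dropWhile (fun y => y == x)).count x = 0 := by
  induction rest with
  | nil => simp
  | cons y t ih =>
    by_cases hyx : (y == x) = true
    · rw [List.dropWhile_cons, if_pos hyx]
      exact ih (fun z hz => hle z (List.mem_cons_of_mem _ hz)) hp.of_cons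
    · rw [List.dropWhile_cons, if_neg hyx]
      have hxy : x ≠ y := by
        intro h; exact hyx (by simp [h.symm])
      have hxlty : x < y := lt_of_le_of_ne (hle y (List.mem_cons_self)) hxy
      rw [List.count_eq_zero]
      intro hmem
      rcases List.mem_cons.mp hmem with h | h
      · exact hxy h
      · exact absurd (lt_of_lt_of_le hxlty ((List.pairwise_cons.mp hp).1 x h)) (lt_irrefl x)

-- dropping the matched prefix is dropWhile
theorem drop_length_takeWhile_eq (p : String → Bool) (l : List String) :
    l.drop (l.takeWhile p).length = l.dropWhile p := by
  induction l with
  | nil => rfl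
  | cons a t ih =>
    by_cases h : p a
    · simp [h, ih]
    · simp [h]

-- the run-length scan of a sorted list yields the total count of each member
theorem getD_pvGroupRuns_aux (N : Nat) : ∀ (l : List String), l.length ≤ N →
    l.Pairwise (· ≤ ·) → ∀ (d : PySem.Dict String Int) (k : String),
    (pvGroupRuns d l).getD k 0 = if k ∈ l then (l.count k : Int) else d.getD k 0 := by
  induction N with
  | zero =>
    intro l hlen _ d k
    have hnil : l = [] := List.eq_nil_of_length_eq_zero (Nat.le_zero.mp hlen)
    subst hnil; simp [pvGroupRuns]
  | succ N ihN =>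
    intro l hlen hp d k
    match l with
    | [] => simp [pvGroupRuns]
    | x :: rest =>
      rw [pvGroupRuns]
      set n : Nat := 1 + (rest.takeWhile (fun y => y == x)).length with hn
      have hdrop : (x :: rest).drop n = rest.dropWhile (fun y => y == x) := by
        rw [hn, Nat.add_comm 1, List.drop_succ_cons, drop_length_takeWhile_eq]
      have hle : ∀ y ∈ rest, x ≤ y := fun y hy => (List.pairwise_cons.mp hp).1 y hy
      have hcount0 : ((x :: rest).drop n).count x = 0 := by
        rw [hdrop]; exact count_dropWhile_sorted_eq_zero x rest hle hp.of_cons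
      have hxnot : x ∉ (x :: rest).drop n := by
        intro hmem
        exact absurd hcount0 (by simpa using (List.count_pos_iff.mpr hmem).ne')
      have hsplit : rest = rest.takeWhile (fun y => y == x) ++ rest.dropWhile (fun y => y == x) :=
        (List.takeWhile_append_dropWhile).symm
      have htake : ∀ y ∈ rest.takeWhile (fun y => y == x), y = x := by
        intro y hy
        simpa using List.mem_takeWhile_imp hy
      have hp' : ((x :: rest).drop n).Pairwise (· ≤ ·) := by
        rw [hdrop]
        exact List.Pairwise.sublist (List.dropWhile_sublist _) hp.of_cons
      have hlen' : ((x :: rest).drop n).length ≤ N := by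
        simp only [List.length_drop, List.length_cons] at *
        omega
      have hcntrest : rest.count x = (rest.takeWhile (fun y => y == x)).length := by
        conv_lhs => rw [hsplit]
        rw [List.count_append, ← hdrop, hcount0, Nat.add_zero,
            List.count_eq_length.mpr (fun b hb => (htake b hb).symm)]
      rw [ihN _ hlen' hp']
      by_cases hk : k = x
      · rw [hk, if_neg hxnot, PySem.Dict.getD_insert_self, if_pos List.mem_cons_self,
            List.count_cons_self, hcntrest, hn]
        push_cast
        ring
      · have hne : k ≠ x := hk
        have hcnt_eq : ((x :: rest).drop n).count k = (x :: rest).count k := by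
          rw [hdrop, List.count_cons_of_ne (Ne.symm hne)]
          conv_rhs => rw [hsplit]
          rw [List.count_append, List.count_eq_zero.mpr (fun hmem => hne (htake k hmem)),
              Nat.zero_add]
        by_cases hmem : k ∈ (x :: rest).drop n
        · have hmem' : k ∈ x :: rest := List.mem_of_mem_drop hmem
          simp [hmem, hmem', hcnt_eq]
        · have hnotall : k ∉ x :: rest := by
            intro hmem'
            rcases List.mem_cons.mp hmem' with h | h
            · exact hne h
            · rw [hsplit] at h
              rcases List.mem_append.mp h with h | h
              · exact hne (htake k h)
              · exact hmem (by rw [hdrop]; exact h)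
          simp [hmem, hnotall, PySem.Dict.getD_insert_of_ne _ _ _ hne]

theorem getD_pvGroupRuns (l : List String) (hp : l.Pairwise (· ≤ ·))
    (d : PySem.Dict String Int) (k : String) :
    (pvGroupRuns d l).getD k 0 = if k ∈ l then (l.count k : Int) else d.getD k 0 :=
  getD_pvGroupRuns_aux l.length l le_rfl hp d k

-- a fold of inserts whose value depends only on the key: final lookup
theorem getD_foldl_insert_fun (l : List String) (f : String → Int)
    (d : PySem.Dict String Int) (v : String) :
    (l.foldl (fun d a => d.insert a (f a)) d).getD v 0
      = if v ∈ l then f v else d.getD v 0 := by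
  induction l generalizing d with
  | nil => simp
  | cons a t ih =>
    simp only [List.foldl_cons, ih, List.mem_cons]
    by_cases hv : v ∈ t
    · simp [hv]
    · by_cases hva : v = a
      · subst hva; simp [hv, PySem.Dict.getD_insert_self]
      · simp [hv, hva, PySem.Dict.getD_insert_of_ne d (f a) 0 hva]

-- ===== VERDICT (by name: the statement is the Claim_ definition above) =====
theorem area_counts_spec : Claim_equal_area_counts := by
  intro hurricanes _ _
  unfold Spec_area_counts area_counts_alt
  rw [area_counts_eq_items_counter, PySem.Dict.items_counter]
  set areas := hurricanes.flatMap (fun h => (PySem.Dict.mk h.2).getD "Areas Affected" []) with hareas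
  have hndB : ((PySem.List.dedup areas).foldl (fun (d : PySem.Dict String Int) a =>
      d.insert a ((pvGroupRuns PySem.Dict.empty (PySem.List.sorted areas (fun x => x))).getD a 0))
      PySem.Dict.empty).keys.Nodup :=
    PySem.Dict.nodup_keys_foldl_insert _ _ PySem.Dict.empty PySem.Dict.nodup_keys_empty
  rw [PySem.Dict.items_eq_map_keys _ hndB 0]
  have hkB : ((PySem.List.dedup areas).foldl (fun (d : PySem.Dict String Int) a =>
      d.insert a ((pvGroupRuns PySem.Dict.empty (PySem.List.sorted areas (fun x => x))).getD a 0))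
      PySem.Dict.empty).keys = PySem.Set.ofList areas := by
    have hke : (PySem.Dict.empty : PySem.Dict String Int).keys = ([] : List String) := rfl
    rw [PySem.Dict.keys_foldl_insert, hke, PySem.Set.update_nil_left, PySem.List.dedup_eq_ofList]
    exact PySem.Set.ofList_eq_self_of_nodup _ (PySem.Set.nodup_ofList areas)
  rw [hkB]
  apply List.map_congr_left
  intro k hk
  have hkmem : k ∈ areas := (PySem.Set.mem_ofList _ _).mp hk
  have hkded : k ∈ PySem.List.dedup areas := by
    rw [PySem.List.dedup_eq_ofList]; exact hk
  rw [getD_foldl_insert_fun _ _ _ k, if_pos hkded,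
      getD_pvGroupRuns _ (PySem.List.sorted_pairwise areas (fun x => x)) _ k,
      if_pos ((PySem.List.mem_sorted areas (fun x => x) false k).mpr hkmem),
      (PySem.List.sorted_perm areas (fun x => x) false).count_eq]
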